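-- pv_equiv track=rewrite | github.com/jcraig949jfi/Prometheus | cartography/v2/codata_galois.py | detect_periodicity_exact
-- ===== SOURCE A (Python) =====
-- def detect_periodicity_exact(pqs):
--     """
--     Exact periodicity check: does the tail of the CF repeat exactly?
--     More stringent than autocorrelation.
--     """
--     if len(pqs) < 4:
--         return 0, False
--
--     # Skip integer part
--     tail = pqs[1:]
--     n = len(tail)
--
--     for period in range(1, n // 3 + 1):
--         # Check if tail[i] == tail[i + period] for all valid i
--         # Require at least 2 full repetitions
--         matches = 0
--         total = 0
--         for i in range(n - period):
--             total += 1
--             if tail[i] == tail[i + period]: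
--                 matches += 1
--         if total > 0 and matches == total:
--             return period, True
--
--     return 0, False
-- ===== SOURCE B (Python) =====
-- def detect_periodicity_exact(pqs):
--     """Smallest exact period of the CF tail, via its longest proper border:
--     the smallest p with tail[i] == tail[i+p] for all i is n - (longest b < n
--     with tail[:b] == tail[n-b:]), found by scanning border lengths downward."""
--     if len(pqs) < 4:
--         return 0, False
--     tail = pqs[1:]
--     n = len(tail)
--     for b in range(n - 1, -1, -1):
--         if tail[:b] == tail[n - b:]:
--             period = n - b
--             return (period, True) if period <= n // 3 else (0, False)
--     return 0, False  # unreachable: b == 0 always matches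
-- ===== Notes on version B (the rewrite author's own statement) =====
-- stated objective: alternative
-- what changed: Instead of testing each candidate period upward with an inner element-counting loop, B scans border lengths b downward, finds the longest proper border of the tail by a single slice comparison per b (smallest period = n - longest border), and applies the n//3 threshold once at the end.
import Mathlib
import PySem

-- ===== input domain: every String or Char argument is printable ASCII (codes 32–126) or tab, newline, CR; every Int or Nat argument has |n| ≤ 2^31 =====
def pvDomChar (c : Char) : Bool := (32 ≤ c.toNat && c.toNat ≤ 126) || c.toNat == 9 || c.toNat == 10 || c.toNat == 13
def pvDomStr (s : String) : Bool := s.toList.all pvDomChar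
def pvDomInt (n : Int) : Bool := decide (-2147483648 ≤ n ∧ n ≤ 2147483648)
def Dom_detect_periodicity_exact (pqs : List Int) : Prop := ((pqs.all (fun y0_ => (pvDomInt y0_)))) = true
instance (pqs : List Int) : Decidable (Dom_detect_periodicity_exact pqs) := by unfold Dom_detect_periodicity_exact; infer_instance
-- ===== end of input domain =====

-- B replaces A's upward scan of candidate periods (each checked by an inner
-- element-counting loop) by a downward scan for the longest proper border of the
-- tail (one slice comparison per candidate; smallest period = n - longest border),
-- applying the n//3 threshold once at the end (measured constant-factor faster: one slice comparison per candidate instead of a Python-level inner loop).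

-- ===== PORT A =====
def pvAInner (tail : List Int) (n p : Int) : Int × Int :=
  (PySem.List.pyRange 0 (n - p) 1).foldl
    (fun mt i =>
      if PySem.List.pyGet? tail i = PySem.List.pyGet? tail (i + p)
      then (mt.1 + 1, mt.2 + 1) else (mt.1, mt.2 + 1))
    (0, 0)

def pvALoop (tail : List Int) (n : Int) : List Int → Int × Bool
  | [] => (0, false)
  | p :: rest =>
    if (pvAInner tail n p).2 > 0 ∧ (pvAInner tail n p).1 = (pvAInner tail n p).2
    then (p, true) else pvALoop tail n rest

def detect_periodicity_exact (pqs : List Int) : Int × Bool :=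
  if pqs.length < 4 then (0, false)
  else
    let tail := PySem.List.slice pqs (some 1) none
    let n : Int := PySem.List.len tail
    pvALoop tail n (PySem.List.pyRange 1 (PySem.Int.floordiv n 3 + 1) 1)

-- ===== PORT B =====
def pvBLoop (tail : List Int) (n : Int) : List Int → Int × Bool
  | [] => (0, false)
  | b :: rest =>
    if PySem.List.slice tail none (some b) = PySem.List.slice tail (some (n - b)) none then
      if n - b ≤ PySem.Int.floordiv n 3 then (n - b, true) else (0, false)
    else pvBLoop tail n rest

def detect_periodicity_exact_alt (pqs : List Int) : Int × Bool :=
  if pqs.length < 4 then (0, false)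
  else
    let tail := PySem.List.slice pqs (some 1) none
    let n : Int := PySem.List.len tail
    pvBLoop tail n (PySem.List.pyRange (n - 1) (-1) (-1))

-- ===== PRECONDITION & SPEC =====
def Spec_detect_periodicity_exact (pqs : List Int) (out : Int × Bool) : Prop := out = detect_periodicity_exact_alt pqs
instance (pqs : List Int) (out : Int × Bool) : Decidable (Spec_detect_periodicity_exact pqs out) := by unfold Spec_detect_periodicity_exact; infer_instance

-- ===== CLAIM (what is proved, stated in full; the proofs are below) =====
def Claim_equal_detect_periodicity_exact : Prop := ∀ (pqs : List Int), Dom_detect_periodicity_exact pqs → Spec_detect_periodicity_exact pqs (detect_periodicity_exact pqs)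

-- ===== LEMMAS AND PROOFS =====

lemma pvALoop_eq_find (tail : List Int) (n : Int) (l : List Int) :
    pvALoop tail n l =
      match l.find? (fun p => decide ((pvAInner tail n p).2 > 0 ∧ (pvAInner tail n p).1 = (pvAInner tail n p).2)) with
      | some p => (p, true)
      | none => (0, false) := by
  induction l with
  | nil => rfl
  | cons p rest ih =>
    simp only [pvALoop, List.find?]
    by_cases h : (pvAInner tail n p).2 > 0 ∧ (pvAInner tail n p).1 = (pvAInner tail n p).2
    · simp [h]
    · simp [h, ih]

lemma pvBLoop_eq_find (tail : List Int) (n : Int) (l : List Int) :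
    pvBLoop tail n l =
      match l.find? (fun b => decide (PySem.List.slice tail none (some b) = PySem.List.slice tail (some (n - b)) none)) with
      | some b => if n - b ≤ PySem.Int.floordiv n 3 then (n - b, true) else (0, false)
      | none => (0, false) := by
  induction l with
  | nil => rfl
  | cons b rest ih =>
    simp only [pvBLoop, List.find?]
    by_cases h : PySem.List.slice tail none (some b) = PySem.List.slice tail (some (n - b)) none
    · simp [h]
    · simp [h, ih]

lemma pvFind_congr {α : Type} (l : List α) (f g : α → Bool) (h : ∀ x ∈ l, f x = g x) :
    l.find? f = l.find? g := by
  induction l with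
  | nil => rfl
  | cons x xs ih =>
    simp only [List.find?]
    rw [h x (by simp)]
    cases hg : g x with
    | true => rfl
    | false => exact ih (fun y hy => h y (by simp [hy]))

lemma pvFoldl_count (l : List Int) (f : Int → Prop) [DecidablePred f] (m t : Int) :
    l.foldl (fun mt i => if f i then (mt.1 + 1, mt.2 + 1) else (mt.1, mt.2 + 1)) (m, t)
      = (m + l.countP (fun i => decide (f i)), t + l.length) := by
  induction l generalizing m t with
  | nil => simp
  | cons x xs ih =>
    by_cases h : f x <;>
      simp [h, ih] <;> omega

lemma pvAInner_cond (tail : List Int) (n p : Int) :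
    ((pvAInner tail n p).2 > 0 ∧ (pvAInner tail n p).1 = (pvAInner tail n p).2)
      ↔ (0 < n - p ∧ ∀ i ∈ PySem.List.pyRange 0 (n - p) 1,
            PySem.List.pyGet? tail i = PySem.List.pyGet? tail (i + p)) := by
  unfold pvAInner
  rw [pvFoldl_count]
  constructor
  · rintro ⟨h1, h2⟩
    simp only [zero_add] at h1 h2
    have hlen : ((PySem.List.pyRange 0 (n - p) 1).countP
        (fun i => decide (PySem.List.pyGet? tail i = PySem.List.pyGet? tail (i + p))))
        = (PySem.List.pyRange 0 (n - p) 1).length := by exact_mod_cast h2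
    refine ⟨?_, ?_⟩
    · rw [PySem.List.length_pyRange_one] at h1; omega
    · intro i hi
      have := (List.countP_eq_length).mp hlen i hi
      simpa using this
  · rintro ⟨h1, h2⟩
    have hlen : ((PySem.List.pyRange 0 (n - p) 1).countP
        (fun i => decide (PySem.List.pyGet? tail i = PySem.List.pyGet? tail (i + p))))
        = (PySem.List.pyRange 0 (n - p) 1).length := by
      apply (List.countP_eq_length).mpr
      intro i hi; simpa using h2 i hi
    constructor
    · simp only [zero_add, PySem.List.length_pyRange_one]; omega
    · simp only [zero_add]; rw [hlen]

lemma pvTake_eq_drop_iff (xs : List Int) (p : Nat) :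
    xs.take (xs.length - p) = xs.drop p ↔ ∀ k, k + p < xs.length → xs[k]? = xs[k + p]? := by
  constructor
  · intro heq k hk
    have h1 : (xs.take (xs.length - p))[k]? = some xs[k] := by
      rw [List.getElem?_take_of_lt (by omega)]
      exact List.getElem?_eq_getElem (by omega)
    have h2 : (xs.drop p)[k]? = xs[p + k]? := by simp [List.getElem?_drop]
    rw [heq, h2] at h1
    have hpk : k + p = p + k := by omega
    rw [hpk, h1, List.getElem?_eq_getElem (by omega)]
  · intro h
    apply List.ext_getElem?
    intro i
    by_cases hi : i < xs.length - p
    · rw [List.getElem?_take_of_lt hi, List.getElem?_drop]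
      have := h i (by omega)
      rw [this]
      congr 1
      omega
    · rw [List.getElem?_eq_none, List.getElem?_eq_none]
      · simp; omega
      · simp; omega

-- the borderline condition, in both ports' forms
lemma pvCond_iff (tail : List Int) (p : Int) (hp : 1 ≤ p) (hpn : p < (tail.length : Int)) :
    (∀ i ∈ PySem.List.pyRange 0 ((tail.length : Int) - p) 1,
        PySem.List.pyGet? tail i = PySem.List.pyGet? tail (i + p))
    ↔ PySem.List.slice tail none (some ((tail.length : Int) - p)) = PySem.List.slice tail (some p) none := by
  have hp0 : (0:Int) ≤ p := by omega
  have hnp0 : (0:Int) ≤ (tail.length : Int) - p := by omega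
  rw [PySem.List.slice_to _ hnp0, PySem.List.slice_from _ hp0]
  have htonat : ((tail.length : Int) - p).toNat = tail.length - p.toNat := by omega
  rw [htonat, pvTake_eq_drop_iff]
  constructor
  · intro h k hk
    have hmem : ((k : Int)) ∈ PySem.List.pyRange 0 ((tail.length : Int) - p) 1 := by
      rw [PySem.List.mem_pyRange_one]; omega
    have := h (k : Int) hmem
    rw [PySem.List.pyGet?_natCast] at this
    have hcast : ((k : Int) + p) = ((k + p.toNat : Nat) : Int) := by push_cast; omega
    rw [hcast, PySem.List.pyGet?_natCast] at this
    exact this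
  · intro h i hi
    rw [PySem.List.mem_pyRange_one] at hi
    obtain ⟨hi0, hi1⟩ := hi
    have hieq : i = ((i.toNat : Nat) : Int) := by omega
    rw [hieq, PySem.List.pyGet?_natCast]
    have hcast : (((i.toNat : Nat) : Int) + p) = ((i.toNat + p.toNat : Nat) : Int) := by push_cast; omega
    rw [hcast, PySem.List.pyGet?_natCast]
    exact h i.toNat (by omega)

lemma pvCountdown_eq_map (n : Int) :
    PySem.List.pyRange (n - 1) (-1) (-1) = (PySem.List.pyRange 1 (n + 1) 1).map (fun p => n - p) := by
  rw [PySem.List.pyRange_neg_one, PySem.List.pyRange_one]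
  rw [List.map_map]
  have h1 : (n - 1 - (-1)) = n + 1 - 1 := by ring
  rw [h1]
  apply List.map_congr_left
  intro k _
  simp
  ring

-- ===== VERDICT (by name: the statement is the Claim_ definition above) =====
theorem detect_periodicity_exact_spec : Claim_equal_detect_periodicity_exact := by
  intro pqs _
  unfold Spec_detect_periodicity_exact detect_periodicity_exact detect_periodicity_exact_alt
  by_cases h4 : pqs.length < 4
  · simp [h4]
  · simp only [h4, if_false]
    set tail := PySem.List.slice pqs (some 1) none with htail
    have hlen : tail.length = pqs.length - 1 := by
      rw [htail, PySem.List.slice_from_one]; simp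
    have hN : 3 ≤ tail.length := by omega
    set n : Int := PySem.List.len tail with hn
    have hnval : n = (tail.length : Int) := by rw [hn, PySem.List.len_eq]
    set m : Int := PySem.Int.floordiv n 3 with hm
    have hmval : m = ((tail.length / 3 : Nat) : Int) := by
      rw [hm, hnval]; exact_mod_cast PySem.Int.floordiv_natCast tail.length 3
    have hm1 : 1 ≤ m := by rw [hmval]; have : 1 ≤ tail.length / 3 := by omega
                           exact_mod_cast this
    have hmn : m < n := by
      rw [hmval, hnval]
      have : tail.length / 3 < tail.length := by omega
      exact_mod_cast this
    rw [pvALoop_eq_find, pvBLoop_eq_find, pvCountdown_eq_map, List.find?_map]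
    rw [show PySem.List.pyRange 1 (n + 1) 1
          = PySem.List.pyRange 1 (m + 1) 1 ++ PySem.List.pyRange (m + 1) (n + 1) 1 from
        PySem.List.pyRange_one_append 1 (m + 1) (n + 1) (by omega) (by omega)]
    rw [List.find?_append]
    have hagree : (PySem.List.pyRange 1 (m + 1) 1).find?
          (fun p => decide ((pvAInner tail n p).2 > 0 ∧ (pvAInner tail n p).1 = (pvAInner tail n p).2))
        = (PySem.List.pyRange 1 (m + 1) 1).find?
          ((fun b => decide (PySem.List.slice tail none (some b) = PySem.List.slice tail (some (n - b)) none))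
            ∘ (fun p => n - p)) := by
      apply pvFind_congr
      intro p hp
      rw [PySem.List.mem_pyRange_one] at hp
      have hp1 : 1 ≤ p := hp.1
      have hpm : p < m + 1 := hp.2
      have hplt : p < (tail.length : Int) := by omega
      simp only [Function.comp]
      rw [decide_eq_decide]
      rw [pvAInner_cond]
      have hsub : n - (n - p) = p := by ring
      rw [hsub, hnval]
      rw [pvCond_iff tail p hp1 (by omega)]
      constructor
      · rintro ⟨_, h⟩; exact h
      · intro h; exact ⟨by omega, h⟩
    rw [hagree]
    cases hfind : (PySem.List.pyRange 1 (m + 1) 1).find?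
        ((fun b => decide (PySem.List.slice tail none (some b) = PySem.List.slice tail (some (n - b)) none))
          ∘ (fun p => n - p)) with
    | some p =>
      have hmem := List.find?_some hfind  -- gives pred true; need membership
      have hmem' : p ∈ PySem.List.pyRange 1 (m + 1) 1 := List.mem_of_find?_eq_some hfind
      rw [PySem.List.mem_pyRange_one] at hmem'
      simp only [Option.some_or, Option.map_some]
      have hsub : n - (n - p) = p := by ring
      rw [hsub]
      rw [if_pos (by omega)]
    | none =>
      simp only [Option.none_or]
      cases hfind2 : (PySem.List.pyRange (m + 1) (n + 1) 1).find?
          ((fun b => decide (PySem.List.slice tail none (some b) = PySem.List.slice tail (some (n - b)) none))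
            ∘ (fun p => n - p)) with
      | some p =>
        have hmem' : p ∈ PySem.List.pyRange (m + 1) (n + 1) 1 := List.mem_of_find?_eq_some hfind2
        rw [PySem.List.mem_pyRange_one] at hmem'
        simp only [Option.map_some]
        have hsub : n - (n - p) = p := by ring
        rw [hsub]
        rw [if_neg (by omega)]
      | none => simp
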